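-- pv_equiv track=rewrite | github.com/a-gavriel/Python-Games | Clases/Clases-Ejecicios/Soluciones/6a.py | prod_escalarM_aux
-- ===== SOURCE A (Python) =====
-- def prod_escalarM_aux(escalar,M,filas,cols, i, j):
--     if i == filas: #Ya se recorrieron todas las filas
--         return M
--     elif j == cols: #Ya se recorrió una fila
--         return prod_escalarM_aux(escalar,M,filas, cols, i+1, 0) # Se pasa a la próxima fila
--     else:
--         elemento = M[i][j]  #Elemento (i,j) de la matriz
--         M[i][j] = elemento * escalar
--         return prod_escalarM_aux(escalar,M,filas, cols, i, j+1 ) #Se pasa al siguiente elemento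
-- ===== SOURCE B (Python) =====
-- def prod_escalarM_aux(escalar, M, filas, cols, i, j):
--     # Row-at-a-time rewrite: scale the rest of row i by slicing, then scale
--     # each remaining row whole.  Mutates M in place (rebinds row objects) and
--     # returns the same object M, like A.
--     if i != filas:
--         row = M[i]
--         M[i] = row[:j] + [x * escalar for x in row[j:]]
--         for r in range(i + 1, filas):
--             M[r] = [x * escalar for x in M[r]]
--     return M
-- ===== Notes on version B (the rewrite author's own statement) =====
-- stated objective: simpler
-- what changed: Replaces A's cell-by-cell three-way recursion with a direct row-at-a-time rewrite: slice-and-comprehension for the partial first row, then one loop scaling each remaining row whole.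
-- outside the precondition, e.g. on prod_escalarM_aux(2, [[1, 2]], 1, 1, 0, 0): A returns [[2, 2]], B returns [[2, 4]]; on prod_escalarM_aux(2, [[1]], 1, 1, 0, -1): A returns [[4]], B returns [[2]]
import Mathlib
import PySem

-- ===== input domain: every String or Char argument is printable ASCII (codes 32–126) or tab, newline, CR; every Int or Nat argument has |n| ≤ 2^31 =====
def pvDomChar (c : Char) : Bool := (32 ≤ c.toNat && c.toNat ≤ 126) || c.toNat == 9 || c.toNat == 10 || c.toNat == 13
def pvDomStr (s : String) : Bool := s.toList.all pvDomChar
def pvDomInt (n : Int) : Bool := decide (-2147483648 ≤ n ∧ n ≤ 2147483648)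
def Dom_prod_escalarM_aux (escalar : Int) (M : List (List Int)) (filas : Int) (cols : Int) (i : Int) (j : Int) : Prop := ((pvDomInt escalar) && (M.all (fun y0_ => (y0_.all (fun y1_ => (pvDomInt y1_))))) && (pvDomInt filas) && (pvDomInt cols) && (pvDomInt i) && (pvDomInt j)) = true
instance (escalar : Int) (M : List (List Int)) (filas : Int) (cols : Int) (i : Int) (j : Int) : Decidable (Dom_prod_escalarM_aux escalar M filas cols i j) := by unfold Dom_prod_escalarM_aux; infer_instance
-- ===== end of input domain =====

-- B scales row i from column j by slice+map and every later row whole, instead of A's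
-- cell-by-cell recursion; equivalence is about the RETURN value (both Pythons mutate M in place).

-- ===== PORT A =====
-- A's recursion is made total with a fuel counter; on Pre_ inputs the fuel never runs out.
-- The three branches, the reads M[i][j] and the write M[i][j] = … are transcribed one for one
-- (pyGet?/pySet? = Python indexing; the `none` cases are Python's IndexError, excluded by Pre_).
def prodEscalarAuxFuel (escalar : Int) (filas : Int) (cols : Int) : Nat → List (List Int) → Int → Int → List (List Int)
  | 0, M, _, _ => M
  | Nat.succ fuel, M, i, j =>
    if i = filas then M
    else if j = cols then prodEscalarAuxFuel escalar filas cols fuel M (i + 1) 0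
    else
      match PySem.List.pyGet? M i with
      | none => M
      | some row =>
        match PySem.List.pyGet? row j with
        | none => M
        | some elemento =>
          match PySem.List.pySet? row j (elemento * escalar) with
          | none => M
          | some row' =>
            match PySem.List.pySet? M i row' with
            | none => M
            | some M' => prodEscalarAuxFuel escalar filas cols fuel M' i (j + 1)

def prod_escalarM_aux (escalar : Int) (M : List (List Int)) (filas : Int) (cols : Int) (i : Int) (j : Int) : List (List Int) :=
  prodEscalarAuxFuel escalar filas cols ((filas - i).toNat * (cols.toNat + 1) + (cols - j).toNat + 1) M i j

-- ===== PORT B =====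
def prod_escalarM_aux_alt (escalar : Int) (M : List (List Int)) (filas : Int) (cols : Int) (i : Int) (j : Int) : List (List Int) :=
  if i ≠ filas then
    -- row = M[i]; M[i] = row[:j] + [x*escalar for x in row[j:]]
    let M1 :=
      match PySem.List.pyGet? M i with
      | none => M
      | some row =>
        match PySem.List.pySet? M i (PySem.List.slice row none (some j) ++ (PySem.List.slice row (some j) none).map (fun x => x * escalar)) with
        | none => M
        | some M' => M'
    -- for r in range(i+1, filas): M[r] = [x*escalar for x in M[r]]
    (PySem.List.pyRange (i + 1) filas 1).foldl
      (fun acc r =>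
        match PySem.List.pyGet? acc r with
        | none => acc
        | some row =>
          match PySem.List.pySet? acc r (row.map (fun x => x * escalar)) with
          | none => acc
          | some acc' => acc') M1
  else M

-- ===== PRECONDITION & SPEC =====
-- Pre_ excludes inputs where A raises (IndexError on missing rows/cells, unbounded recursion on
-- j > cols or i > filas) and, where A does return, two accidental corners: negative i/j (Python's
-- negative-index wraparound makes A rescale cell 0 twice) and rows whose length differs from cols
-- (then cols no longer describes the matrix shape and A's partial scaling is an artefact).
def Pre_prod_escalarM_aux (escalar : Int) (M : List (List Int)) (filas : Int) (cols : Int) (i : Int) (j : Int) : Prop :=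
  i = filas ∨
    (0 ≤ i ∧ i < filas ∧ filas = (M.length : Int) ∧ 0 ≤ j ∧ j ≤ cols ∧
      ∀ row ∈ M, (row.length : Int) = cols)
instance (escalar : Int) (M : List (List Int)) (filas : Int) (cols : Int) (i : Int) (j : Int) : Decidable (Pre_prod_escalarM_aux escalar M filas cols i j) := by unfold Pre_prod_escalarM_aux; infer_instance

def pvWitness_prod_escalarM_aux : Int × List (List Int) × Int × Int × Int × Int := (2, [[1, 2], [3, 4]], 2, 2, 0, 1)

def Spec_prod_escalarM_aux (escalar : Int) (M : List (List Int)) (filas : Int) (cols : Int) (i : Int) (j : Int) (out : List (List Int)) : Prop := out = prod_escalarM_aux_alt escalar M filas cols i j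
instance (escalar : Int) (M : List (List Int)) (filas : Int) (cols : Int) (i : Int) (j : Int) (out : List (List Int)) : Decidable (Spec_prod_escalarM_aux escalar M filas cols i j out) := by unfold Spec_prod_escalarM_aux; infer_instance

-- ===== CLAIM (what is proved, stated in full; the proofs are below) =====
def Claim_equal_prod_escalarM_aux : Prop := ∀ (escalar : Int) (M : List (List Int)) (filas : Int) (cols : Int) (i : Int) (j : Int), Dom_prod_escalarM_aux escalar M filas cols i j → Pre_prod_escalarM_aux escalar M filas cols i j → Spec_prod_escalarM_aux escalar M filas cols i j (prod_escalarM_aux escalar M filas cols i j)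

-- ===== LEMMAS AND PROOFS =====

def pvScaleRow (escalar : Int) (row : List Int) (j : Nat) : List Int :=
  row.take j ++ (row.drop j).map (fun x => x * escalar)

def pvSpecTail (escalar : Int) (j : Nat) : List (List Int) → List (List Int)
  | [] => []
  | r :: rest => pvScaleRow escalar r j :: rest.map (fun row => row.map (fun x => x * escalar))

def pvSpec (escalar : Int) (M : List (List Int)) (i j : Nat) : List (List Int) :=
  M.take i ++ pvSpecTail escalar j (M.drop i)

-- List.set splitting helpers
theorem pvSet_split {a : Type} (l : List a) (n : Nat) (x : a) (h : n < l.length) :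
    l.set n x = l.take n ++ x :: l.drop (n+1) := by
  rw [List.set_eq_take_append_cons_drop, if_pos h]

theorem pvTake_set {a : Type} (l : List a) (n : Nat) (x : a) (h : n < l.length) :
    (l.set n x).take (n+1) = l.take n ++ [x] := by
  rw [pvSet_split l n x h]
  rw [show n + 1 = (l.take n).length + 1 by simp [List.length_take]; omega]
  rw [List.take_append]
  simp

theorem pvDrop_set {a : Type} (l : List a) (n : Nat) (x : a) (h : n < l.length) :
    (l.set n x).drop (n+1) = l.drop (n+1) := by
  rw [pvSet_split l n x h]
  rw [show n + 1 = (l.take n).length + 1 by simp [List.length_take]; omega]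
  rw [List.drop_append]
  simp

theorem pvTake_set_le {a : Type} (l : List a) (n : Nat) (x : a) :
    (l.set n x).take n = l.take n := by
  rw [List.take_set]
  exact List.set_eq_of_length_le (by simp [List.length_take])

-- Python indexing on a nonnegative in-range Int index
theorem pvPySet?_int {a : Type} (xs : List a) (i : Int) (v : a) (h0 : 0 <= i)
    (h : i < (xs.length : Int)) :
    PySem.List.pySet? xs i v = some (xs.set i.toNat v) := by
  simp [PySem.List.pySet?, PySem.List.pyIdx?]
  exact ⟨i.toNat, by rw [if_pos h0, if_pos h], rfl⟩

-- The common value both ports compute: rows before i untouched, row i scaled from column j,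
-- every later row scaled whole.
theorem pvSpec_ge_length (escalar : Int) (M : List (List Int)) (i j : Nat)
    (h : M.length <= i) : pvSpec escalar M i j = M := by
  simp [pvSpec, pvSpecTail, List.drop_eq_nil_of_le h, List.take_of_length_le h]

theorem pvSpec_row_done (escalar : Int) (M : List (List Int)) (i : Nat)
    (hi : i < M.length) :
    pvSpec escalar M i M[i].length = pvSpec escalar M (i + 1) 0 := by
  have hdrop : M.drop i = M[i] :: M.drop (i + 1) := List.drop_eq_getElem_cons hi
  have hfull : pvScaleRow escalar M[i] M[i].length = M[i] := by simp [pvScaleRow]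
  have htake : M.take (i+1) = M.take i ++ [M[i]] := by
    rw [List.take_add_one]
    simp [List.getElem?_eq_getElem hi]
  unfold pvSpec
  rw [hdrop, htake]
  cases hd : M.drop (i + 1) with
  | nil =>
    simp only [pvSpecTail, List.map_nil]
    rw [hfull]
    simp
  | cons r rest =>
    simp only [pvSpecTail, List.map_cons]
    rw [hfull, show pvScaleRow escalar r 0 = r.map (fun x => x * escalar) by simp [pvScaleRow]]
    simp only [List.append_assoc, List.cons_append, List.nil_append]

theorem pvScaleRow_step (escalar : Int) (row : List Int) (j : Nat) (hj : j < row.length) :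
    pvScaleRow escalar (row.set j (row[j] * escalar)) (j + 1) = pvScaleRow escalar row j := by
  unfold pvScaleRow
  rw [pvTake_set row j _ hj, pvDrop_set row j _ hj, List.drop_eq_getElem_cons hj]
  simp only [List.map_cons, List.append_assoc, List.cons_append, List.nil_append]

theorem pvSpec_cell_step (escalar : Int) (M : List (List Int)) (i j : Nat)
    (hi : i < M.length) (hj : j < M[i].length) :
    pvSpec escalar (M.set i (M[i].set j (M[i][j] * escalar))) i (j + 1)
      = pvSpec escalar M i j := by
  have hdrop : M.drop i = M[i] :: M.drop (i + 1) := List.drop_eq_getElem_cons hi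
  have hdrop' : (M.set i (M[i].set j (M[i][j] * escalar))).drop i
      = M[i].set j (M[i][j] * escalar) :: M.drop (i + 1) := by
    calc (M.set i (M[i].set j (M[i][j] * escalar))).drop i
        = (M.take i ++ M[i].set j (M[i][j] * escalar) :: M.drop (i + 1)).drop (M.take i).length := by
          rw [pvSet_split M i _ hi]
          congr 1
          rw [List.length_take, Nat.min_eq_left (Nat.le_of_lt hi)]
      _ = M[i].set j (M[i][j] * escalar) :: M.drop (i + 1) := by rw [List.drop_left]
  unfold pvSpec
  rw [pvTake_set_le, hdrop, hdrop']
  simp only [pvSpecTail]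
  rw [pvScaleRow_step escalar M[i] j hj]

-- ---- A's recursion computes pvSpec (fuel induction) ----
theorem prodAuxA_spec (escalar filas cols : Int) :
    forall (fuel : Nat) (M : List (List Int)) (i j : Int),
      0 <= i -> i <= filas -> filas = (M.length : Int) -> 0 <= j -> j <= cols ->
      (forall row, row ∈ M -> (row.length : Int) = cols) ->
      (filas - i).toNat * (cols.toNat + 1) + (cols - j).toNat + 1 <= fuel ->
      prodEscalarAuxFuel escalar filas cols fuel M i j = pvSpec escalar M i.toNat j.toNat := by
  intro fuel
  induction fuel with
  | zero => intro M i j _ _ _ _ _ _ hf; omega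
  | succ fuel ih =>
    intro M i j hi0 hif hlen hj0 hjc hrows hf
    by_cases hidone : i = filas
    · rw [prodEscalarAuxFuel, if_pos hidone]
      rw [pvSpec_ge_length]
      omega
    · have hilt : i < filas := lt_of_le_of_ne hif hidone
      have hiN : i.toNat < M.length := by omega
      have hrowc : (M[i.toNat].length : Int) = cols := hrows _ (List.getElem_mem hiN)
      by_cases hjdone : j = cols
      · have hc0 : 0 <= cols := le_trans hj0 hjc
        have h1 : (filas - i).toNat = (filas - (i+1)).toNat + 1 := by omega
        have hmul : (filas - i).toNat * (cols.toNat + 1)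
            = (filas - (i+1)).toNat * (cols.toNat + 1) + (cols.toNat + 1) := by
          rw [h1]; ring
        rw [prodEscalarAuxFuel, if_neg hidone, if_pos hjdone]
        rw [ih M (i + 1) 0 (by omega) (by omega) hlen (by omega) hc0 hrows (by
          rw [hmul] at hf
          have h2 : (cols - j).toNat = 0 := by omega
          have h3 : (cols - 0).toNat = cols.toNat := by omega
          omega)]
        have hji : j.toNat = M[i.toNat].length := by omega
        have hij : (i + 1).toNat = i.toNat + 1 := by omega
        rw [hji, pvSpec_row_done escalar M i.toNat hiN, hij]
        norm_num
      · have hjlt : j < cols := lt_of_le_of_ne hjc hjdone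
        have hjN : j.toNat < M[i.toNat].length := by omega
        rw [prodEscalarAuxFuel, if_neg hidone, if_neg hjdone]
        simp only [PySem.List.pyGet?_eq_some_getElem (xs := M) hi0 (by omega),
          PySem.List.pyGet?_eq_some_getElem (xs := M[i.toNat]) hj0 (by omega),
          pvPySet?_int M[i.toNat] j (M[i.toNat][j.toNat] * escalar) hj0 (by omega),
          pvPySet?_int M i (M[i.toNat].set j.toNat (M[i.toNat][j.toNat] * escalar)) hi0 (by omega)]
        rw [ih (M.set i.toNat (M[i.toNat].set j.toNat (M[i.toNat][j.toNat] * escalar))) i (j + 1)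
          hi0 hif (by simp [hlen]) (by omega) (by omega) (by
            intro row hrow
            rcases List.mem_or_eq_of_mem_set hrow with h | h
            · exact hrows _ h
            · subst h
              simp [hrowc]) (by
            have h1 : (cols - j).toNat = (cols - (j + 1)).toNat + 1 := by omega
            omega)]
        have hjs : (j + 1).toNat = j.toNat + 1 := by omega
        rw [hjs, pvSpec_cell_step escalar M i.toNat j.toNat hiN hjN]

-- ---- B computes pvSpec ----
theorem foldB_spec (escalar : Int) :
    forall (n : Nat) (acc : List (List Int)) (r filas : Int),
      0 <= r -> filas = (acc.length : Int) -> n = (filas - r).toNat ->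
      (PySem.List.pyRange r filas 1).foldl
        (fun acc r =>
          match PySem.List.pyGet? acc r with
          | none => acc
          | some row =>
            match PySem.List.pySet? acc r (row.map (fun x => x * escalar)) with
            | none => acc
            | some acc' => acc') acc
      = acc.take r.toNat ++ (acc.drop r.toNat).map (fun row => row.map (fun x => x * escalar)) := by
  intro n
  induction n with
  | zero =>
    intro acc r filas hr0 hlen hn
    rw [PySem.List.pyRange_one_eq_nil (by omega)]
    have hge : acc.length <= r.toNat := by omega
    simp [List.take_of_length_le hge, List.drop_eq_nil_of_le hge]
  | succ n ih =>
    intro acc r filas hr0 hlen hn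
    have hrlt : r < filas := by omega
    have hrN : r.toNat < acc.length := by omega
    rw [PySem.List.pyRange_one_cons hrlt, List.foldl_cons]
    simp only [PySem.List.pyGet?_eq_some_getElem (xs := acc) hr0 (by omega),
      pvPySet?_int acc r (acc[r.toNat].map (fun x => x * escalar)) hr0 (by omega)]
    rw [ih (acc.set r.toNat (acc[r.toNat].map (fun x => x * escalar))) (r + 1) filas (by omega)
      (by simp [hlen]) (by omega)]
    have hr1 : (r + 1).toNat = r.toNat + 1 := by omega
    rw [hr1, pvTake_set acc r.toNat _ hrN, pvDrop_set acc r.toNat _ hrN,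
      List.drop_eq_getElem_cons hrN]
    simp
    conv_rhs => rw [List.drop_eq_getElem_cons (by simpa using hrN)]
    simp

theorem prodB_spec (escalar : Int) (M : List (List Int)) (filas cols i j : Int)
    (hi0 : 0 <= i) (hilt : i < filas) (hlen : filas = (M.length : Int)) (hj0 : 0 <= j) :
    prod_escalarM_aux_alt escalar M filas cols i j = pvSpec escalar M i.toNat j.toNat := by
  have hiN : i.toNat < M.length := by omega
  rw [prod_escalarM_aux_alt, if_pos (show i ≠ filas by omega)]
  simp only [PySem.List.pyGet?_eq_some_getElem (xs := M) hi0 (by omega),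
    PySem.List.slice_to M[i.toNat] hj0, PySem.List.slice_from M[i.toNat] hj0,
    pvPySet?_int M i (M[i.toNat].take j.toNat ++ (M[i.toNat].drop j.toNat).map (fun x => x * escalar)) hi0 (by omega)]
  rw [show M.set i.toNat (M[i.toNat].take j.toNat ++ (M[i.toNat].drop j.toNat).map (fun x => x * escalar))
      = M.set i.toNat (pvScaleRow escalar M[i.toNat] j.toNat) from rfl]
  rw [foldB_spec escalar ((filas - (i + 1)).toNat)
    (M.set i.toNat (pvScaleRow escalar M[i.toNat] j.toNat)) (i + 1) filas (by omega)
    (by simp [hlen]) rfl]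
  have hi1 : (i + 1).toNat = i.toNat + 1 := by omega
  rw [hi1, pvTake_set M i.toNat _ hiN, pvDrop_set M i.toNat _ hiN]
  unfold pvSpec
  rw [List.drop_eq_getElem_cons hiN]
  simp [pvSpecTail]

-- ===== VERDICT (by name: the statement is the Claim_ definition above) =====
theorem prod_escalarM_aux_spec : Claim_equal_prod_escalarM_aux := by
  intro escalar M filas cols i j _hdom hpre
  unfold Spec_prod_escalarM_aux
  rcases hpre with hdone | ⟨hi0, hilt, hlen, hj0, hjc, hrows⟩
  · rw [prod_escalarM_aux, prod_escalarM_aux_alt, if_neg (by simp [hdone])]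
    rw [prodEscalarAuxFuel, if_pos hdone]
  · rw [prod_escalarM_aux]
    rw [prodAuxA_spec escalar filas cols _ M i j hi0 (le_of_lt hilt) hlen hj0 hjc
      (fun row hrow => hrows row hrow) (le_refl _)]
    rw [prodB_spec escalar M filas cols i j hi0 hilt hlen hj0]
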